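-- pv_equiv track=rewrite | github.com/writer/writer-framework | src/writer/core.py | parse_state_variable_expression
-- ===== SOURCE A (Python) =====
-- def parse_state_variable_expression(p: str):
--     r"""
--     Parses a state variable expression into a list of parts.
--
--     >>> parse_state_variable_expression("a.b.c")
--     >>> ["a", "b", "c"]
--
--     >>> parse_state_variable_expression("a\.b.c")
--     >>> ["a.b", "c"]
--     """
--     parts = []
--     it = 0
--     last_split = 0
--     while it < len(p):
--         if p[it] == '\\':
--             it += 2
--         elif p[it] == '.':
--             new_part = p[last_split: it]
--             parts.append(new_part.replace('\\.', '.'))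
--
--             last_split = it + 1
--             it += 1
--         else:
--             it += 1
--
--     new_part = p[last_split: len(p)]
--     parts.append(new_part.replace('\\.', '.'))
--     return parts
-- ===== SOURCE B (Python) =====
-- def parse_state_variable_expression(p: str):
--     """Character-accumulator parser: builds each part in a buffer instead of
--     tracking slice boundaries and running a global '\\.' -> '.' replace."""
--     parts = []
--     buf = []
--     i = 0
--     n = len(p)
--     while i < n:
--         c = p[i]
--         if c == '\\':
--             if i + 1 < n:
--                 nxt = p[i + 1]
--                 if nxt == '.':
--                     buf.append('.')
--                 else:
--                     buf.append(c)
--                     buf.append(nxt)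
--             else:
--                 buf.append(c)
--             i += 2
--         elif c == '.':
--             parts.append(''.join(buf))
--             buf = []
--             i += 1
--         else:
--             buf.append(c)
--             i += 1
--     parts.append(''.join(buf))
--     return parts
-- ===== Notes on version B (the rewrite author's own statement) =====
-- stated objective: alternative
-- what changed: A tracks slice boundaries (last_split/it) and runs a global backslash-dot-to-dot str.replace on each sliced part; B is a character-accumulator parser that builds each part directly in a buffer, unescaping escaped dots inline and flushing the buffer at each unescaped dot.
import Mathlib
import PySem

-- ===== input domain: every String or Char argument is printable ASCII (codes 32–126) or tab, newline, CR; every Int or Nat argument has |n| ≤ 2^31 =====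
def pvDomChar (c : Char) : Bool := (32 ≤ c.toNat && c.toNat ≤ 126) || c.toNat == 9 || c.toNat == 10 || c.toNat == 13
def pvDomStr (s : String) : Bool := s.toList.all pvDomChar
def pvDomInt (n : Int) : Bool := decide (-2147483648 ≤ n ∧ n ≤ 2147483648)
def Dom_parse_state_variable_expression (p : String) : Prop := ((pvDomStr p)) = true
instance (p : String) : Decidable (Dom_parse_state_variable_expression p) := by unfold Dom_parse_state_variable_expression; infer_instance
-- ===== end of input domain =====

-- B replaces A's slice-boundary scan plus a global '\.'→'.' str.replace per part by a
-- character-accumulator parser that builds each part directly (alternative decomposition).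

-- ===== PORT A =====
-- while-loop over index `it`, with `last_split` marking the start of the current part;
-- each emitted part is the slice p[last_split:it] with '\.' replaced by '.' (str.replace).
def pvALoop (cs : List Char) (it ls : Nat) (parts : List String) : List String :=
  if h : it < cs.length then
    if cs[it] = '\\' then
      pvALoop cs (it + 2) ls parts
    else if cs[it] = '.' then
      pvALoop cs (it + 1) (it + 1)
        (parts ++ [String.ofList (PySem.Chars.replace
          (PySem.List.slice cs (some (ls : Int)) (some (it : Int))) ['\\', '.'] ['.'])])
    else
      pvALoop cs (it + 1) ls parts
  else
    parts ++ [String.ofList (PySem.Chars.replace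
      (PySem.List.slice cs (some (ls : Int)) (some (cs.length : Int))) ['\\', '.'] ['.'])]
termination_by cs.length - it

def parse_state_variable_expression (p : String) : List String :=
  pvALoop p.toList 0 0 []

-- ===== PORT B =====
-- character-accumulator parser: `buf` is the part built so far; a backslash consumes the
-- next char ('.' unescaped into buf, anything else kept with its backslash), an unescaped
-- '.' flushes buf into parts.
def pvBLoop (cs buf : List Char) (parts : List String) : List String :=
  match cs with
  | [] => parts ++ [String.ofList buf]
  | c :: rest =>
    if c = '\\' then
      match rest with
      | [] => pvBLoop [] (buf ++ [c]) parts
      | d :: rest2 =>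
        if d = '.' then pvBLoop rest2 (buf ++ ['.']) parts
        else pvBLoop rest2 (buf ++ [c, d]) parts
    else if c = '.' then
      pvBLoop rest [] (parts ++ [String.ofList buf])
    else
      pvBLoop rest (buf ++ [c]) parts

def parse_state_variable_expression_alt (p : String) : List String :=
  pvBLoop p.toList [] []

-- ===== PRECONDITION & SPEC =====
def Spec_parse_state_variable_expression (p : String) (out : List String) : Prop := out = parse_state_variable_expression_alt p
instance (p : String) (out : List String) : Decidable (Spec_parse_state_variable_expression p out) := by unfold Spec_parse_state_variable_expression; infer_instance

-- ===== CLAIM (what is proved, stated in full; the proofs are below) =====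
def Claim_equal_parse_state_variable_expression : Prop := ∀ (p : String), Dom_parse_state_variable_expression p → Spec_parse_state_variable_expression p (parse_state_variable_expression p)

-- ===== LEMMAS AND PROOFS =====

-- recursive characterisation of str.replace('\.', '.') used by A
def pvRepl : List Char → List Char
  | [] => []
  | [c] => [c]
  | c :: d :: t => if c = '\\' ∧ d = '.' then '.' :: pvRepl t else c :: pvRepl (d :: t)

theorem pvRepl_two_match (t : List Char) : pvRepl ('\\' :: '.' :: t) = '.' :: pvRepl t := by
  simp [pvRepl]

theorem pvRepl_two_nomatch (c d : Char) (t : List Char) (h : ¬(c = '\\' ∧ d = '.')) :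
    pvRepl (c :: d :: t) = c :: pvRepl (d :: t) := by
  simp [pvRepl, h]

theorem pvBLoop_nil (buf : List Char) (parts : List String) :
    pvBLoop [] buf parts = parts ++ [String.ofList buf] := by
  rw [pvBLoop]

theorem pvBLoop_bs_nil (buf : List Char) (parts : List String) :
    pvBLoop ['\\'] buf parts = pvBLoop [] (buf ++ ['\\']) parts := rfl

theorem pvBLoop_bs_cons (d : Char) (rest2 buf : List Char) (parts : List String) :
    pvBLoop ('\\' :: d :: rest2) buf parts
      = if d = '.' then pvBLoop rest2 (buf ++ ['.']) parts
        else pvBLoop rest2 (buf ++ ['\\', d]) parts := rfl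

theorem pvBLoop_cons_of (c : Char) (rest buf : List Char) (parts : List String)
    (hc : c ≠ '\\') :
    pvBLoop (c :: rest) buf parts
      = if c = '.' then pvBLoop rest [] (parts ++ [String.ofList buf])
        else pvBLoop rest (buf ++ [c]) parts := by
  cases rest <;> (conv_lhs => rw [pvBLoop]) <;> rw [if_neg hc]

theorem pvGo_eq : ∀ (fuel : Nat) (l acc : List Char), l.length ≤ fuel →
    PySem.Chars.replace.go ['\\', '.'] ['.'] fuel l acc = acc.reverse ++ pvRepl l := by
  intro fuel
  induction fuel with
  | zero =>
    intro l acc h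
    have : l = [] := List.eq_nil_of_length_eq_zero (Nat.le_zero.mp h)
    subst this
    simp [PySem.Chars.replace.go, pvRepl]
  | succ n ih =>
    intro l acc h
    cases l with
    | nil => simp [PySem.Chars.replace.go, pvRepl]
    | cons c t =>
      rw [PySem.Chars.replace.go]
      by_cases hp : List.isPrefixOf ['\\', '.'] (c :: t) = true
      · have hpre : ['\\', '.'] <+: c :: t := by
          simpa [List.isPrefixOf_iff_prefix] using hp
        obtain ⟨s, hs⟩ := hpre
        have hc : c = '\\' := by injection hs.symm
        have ht : t = '.' :: s := by
          have := hs
          injection this with _ h2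
          exact h2.symm
        subst hc; subst ht
        rw [if_pos hp]
        have hlen : s.length ≤ n := by simp at h; omega
        rw [show List.drop ['\\', '.'].length ('\\' :: '.' :: s) = s from rfl, List.reverse_singleton,
           show ['.'] ++ acc = '.' :: acc from rfl, ih s ('.' :: acc) hlen, pvRepl_two_match]
        simp
      · rw [if_neg hp, ih t (c :: acc) (by simpa using Nat.le_of_succ_le_succ h)]
        cases t with
        | nil => simp [pvRepl]
        | cons d t2 =>
          have hnd : ¬(c = '\\' ∧ d = '.') := by
            rintro ⟨rfl, rfl⟩
            exact hp (by simp [List.isPrefixOf])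
          rw [pvRepl_two_nomatch c d t2 hnd]
          simp

theorem pvReplace_eq (s : List Char) :
    PySem.Chars.replace s ['\\', '.'] ['.'] = pvRepl s := by
  unfold PySem.Chars.replace
  simp [pvGo_eq s.length s [] (le_refl _)]

theorem pvRepl_append : ∀ (u v : List Char), v.head? ≠ some '.' →
    pvRepl (u ++ v) = pvRepl u ++ pvRepl v
  | [], v, hv => by simp [pvRepl]
  | [c], v, hv => by
    cases v with
    | nil => simp [pvRepl]
    | cons d v2 =>
      have hd : ¬(c = '\\' ∧ d = '.') := by
        rintro ⟨_, rfl⟩; simp at hv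
      simp only [List.cons_append, List.nil_append, pvRepl_two_nomatch c d v2 hd]
      rfl
  | c :: d :: t, v, hv => by
    by_cases h : c = '\\' ∧ d = '.'
    · obtain ⟨rfl, rfl⟩ := h
      simp only [List.cons_append, pvRepl_two_match, pvRepl_append t v hv]
    · simp only [List.cons_append, pvRepl_two_nomatch c d (t ++ v) h]
      rw [← List.cons_append, pvRepl_append (d :: t) v hv, pvRepl_two_nomatch c d t h]
      simp
termination_by u _ _ => u.length

theorem pvSliceN (cs : List Char) (a b : Nat) :
    PySem.List.slice cs (some (a : Int)) (some (b : Int)) = (cs.drop a).take (b - a) :=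
  PySem.List.slice_natCast cs a b

theorem pvSeg_snoc (cs : List Char) (ls it : Nat) (h1 : ls ≤ it) (h2 : it < cs.length) :
    (cs.drop ls).take (it + 1 - ls) = (cs.drop ls).take (it - ls) ++ [cs[it]] := by
  have : it + 1 - ls = (it - ls) + 1 := by omega
  rw [this, List.take_add_one]
  have hlen : it - ls < (cs.drop ls).length := by simp [List.length_drop]; omega
  rw [List.getElem?_eq_getElem hlen]
  congr 1
  simp
  congr 1
  omega

theorem pvMain (cs : List Char) (it ls : Nat) (parts : List String)
    (h1 : ls ≤ it) (h2 : it ≤ cs.length) :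
    pvALoop cs it ls parts
      = pvBLoop (cs.drop it) (pvRepl ((cs.drop ls).take (it - ls))) parts := by
  rw [pvALoop]
  by_cases h : it < cs.length
  · rw [dif_pos h, List.drop_eq_getElem_cons h]
    by_cases hb : cs[it] = '\\'
    · rw [if_pos hb, hb]
      by_cases h1' : it + 1 < cs.length
      · rw [List.drop_eq_getElem_cons h1', pvBLoop_bs_cons]
        have hstep : pvRepl ((cs.drop ls).take (it + 2 - ls))
            = pvRepl ((cs.drop ls).take (it - ls)) ++ pvRepl ['\\', cs[it + 1]] := by
          have e1 : (cs.drop ls).take (it + 1 - ls)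
              = (cs.drop ls).take (it - ls) ++ [cs[it]] := pvSeg_snoc cs ls it h1 h
          have e2 : (cs.drop ls).take (it + 2 - ls)
              = (cs.drop ls).take (it + 1 - ls) ++ [cs[it + 1]] := by
            have := pvSeg_snoc cs ls (it + 1) (by omega) h1'
            simpa [show it + 1 + 1 = it + 2 by omega] using this
          rw [e2, e1, hb, List.append_assoc, List.singleton_append,
             pvRepl_append _ ['\\', cs[it + 1]] (by simp)]
        rw [pvMain cs (it + 2) ls parts (by omega) (by omega), hstep]
        by_cases hd : cs[it + 1] = '.'
        · rw [if_pos hd, hd, pvRepl_two_match]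
          rfl
        · rw [if_neg hd, pvRepl_two_nomatch '\\' cs[it + 1] [] (by simp [hd])]
          simp [pvRepl]
      · -- it + 1 = cs.length : trailing lone backslash
        have hlen : it + 1 = cs.length := by omega
        have hdrop : cs.drop (it + 1) = [] := by
          apply List.drop_eq_nil_of_le; omega
        rw [hdrop, pvBLoop_bs_nil, pvBLoop_nil, pvALoop]
        rw [dif_neg (by omega)]
        have e1 : (cs.drop ls).take (cs.length - ls)
            = (cs.drop ls).take (it - ls) ++ [cs[it]] := by
          rw [← hlen]; exact pvSeg_snoc cs ls it h1 h
        rw [pvSliceN, pvReplace_eq, e1, hb,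
           pvRepl_append _ ['\\'] (by simp)]
        simp [pvRepl]
    · rw [if_neg hb, pvBLoop_cons_of _ _ _ _ hb]
      by_cases hdot : cs[it] = '.'
      · rw [if_pos hdot, if_pos hdot]
        rw [pvMain cs (it + 1) (it + 1) _ (le_refl _) (by omega)]
        rw [pvSliceN, pvReplace_eq]
        simp [pvRepl]
      · rw [if_neg hdot, if_neg hdot]
        rw [pvMain cs (it + 1) ls parts (by omega) (by omega)]
        have e1 : (cs.drop ls).take (it + 1 - ls)
            = (cs.drop ls).take (it - ls) ++ [cs[it]] := pvSeg_snoc cs ls it h1 h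
        rw [e1, pvRepl_append _ [cs[it]] (by simp [hdot])]
        simp [pvRepl]
  · have hit : it = cs.length := by omega
    rw [dif_neg h]
    have hdrop : cs.drop it = [] := by apply List.drop_eq_nil_of_le; omega
    rw [hdrop, pvBLoop_nil, pvSliceN, pvReplace_eq, hit]
termination_by cs.length - it

-- ===== VERDICT (by name: the statement is the Claim_ definition above) =====
theorem parse_state_variable_expression_spec : Claim_equal_parse_state_variable_expression := by
  intro p _
  unfold Spec_parse_state_variable_expression parse_state_variable_expression parse_state_variable_expression_alt
  have := pvMain p.toList 0 0 [] (le_refl 0) (Nat.zero_le _)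
  simpa [pvRepl] using this
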